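-- pv_equiv track=rewrite | github.com/chunfenri/BAMAS | eapae_agent_sys/execution/execution_engine.py | _decompose_task_for_star
-- ===== SOURCE A (Python) =====
-- def _decompose_task_for_star(task_description: str, num_subtasks: int):
--     """
--     Decompose task for star topology。simple rule-based decomposition。
--     """
--     if "calculate" in task_description.lower() or "compute" in task_description.lower():
--         subtasks = []
--         if num_subtasks >= 2:
--             subtasks.append(f"Extract the numbers and key information from: {task_description}")
--             subtasks.append(f"Determine the mathematical operations needed for: {task_description}")
--             if num_subtasks >= 3:
--                 subtasks.append(f"Perform the calculation for: {task_description}")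
--             if num_subtasks >= 4:
--                 subtasks.append(f"Verify the calculation approach for: {task_description}")
--     else:
--         subtasks = [f"Solve part of this problem: {task_description}" for _ in range(min(num_subtasks, 3))]
--     return subtasks[:num_subtasks]
-- ===== SOURCE B (Python) =====
-- def _decompose_task_for_star(task_description: str, num_subtasks: int):
--     """Same result as A, but data-driven: both cases become one rule table of
--     (minimum subtask count, prefix) rows, and the answer is a single filter —
--     keep each row whose threshold is met.  No branch cascade, no final slice:
--     the thresholds alone reproduce the counts A produces."""
--     low = task_description.lower()
--     if "calculate" in low or "compute" in low:
--         rows = [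
--             (2, "Extract the numbers and key information from: "),
--             (2, "Determine the mathematical operations needed for: "),
--             (3, "Perform the calculation for: "),
--             (4, "Verify the calculation approach for: "),
--         ]
--     else:
--         rows = [(need, "Solve part of this problem: ") for need in (1, 2, 3)]
--     return [prefix + task_description for need, prefix in rows if num_subtasks >= need]
-- ===== Notes on version B (the rewrite author's own statement) =====
-- stated objective: alternative
-- what changed: Replaces A's branch cascade plus trailing slice with a data-driven rule table: each case becomes a list of (minimum-count, prefix) rows and the result is one filter/map pass keeping rows whose threshold num_subtasks meets, with no slicing and no branching on num_subtasks.
import Mathlib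
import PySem

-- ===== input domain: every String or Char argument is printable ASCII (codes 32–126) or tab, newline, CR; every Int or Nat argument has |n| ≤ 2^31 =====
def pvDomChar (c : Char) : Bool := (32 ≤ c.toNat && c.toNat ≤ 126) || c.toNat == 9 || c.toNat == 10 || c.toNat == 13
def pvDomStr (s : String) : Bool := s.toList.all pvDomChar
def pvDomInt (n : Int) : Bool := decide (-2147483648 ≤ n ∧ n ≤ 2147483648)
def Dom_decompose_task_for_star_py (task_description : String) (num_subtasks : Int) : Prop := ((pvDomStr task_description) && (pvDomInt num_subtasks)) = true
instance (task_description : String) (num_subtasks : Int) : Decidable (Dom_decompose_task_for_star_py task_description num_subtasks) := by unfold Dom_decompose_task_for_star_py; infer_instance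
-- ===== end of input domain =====

-- B replaces A's branch cascade plus trailing slice with a rule table of (threshold, prefix) rows and one filter/map pass; same return value everywhere (objective: alternative decomposition).


-- ===== PORT A =====
def decompose_task_for_star_py (task_description : String) (num_subtasks : Int) : List String :=
  if PySem.Str.isIn "calculate" (PySem.Str.lower task_description) ||
     PySem.Str.isIn "compute" (PySem.Str.lower task_description) then
    let subtasks : List String := []
    let subtasks :=
      if num_subtasks ≥ 2 then
        let subtasks := subtasks ++ ["Extract the numbers and key information from: " ++ task_description]
        let subtasks := subtasks ++ ["Determine the mathematical operations needed for: " ++ task_description]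
        let subtasks := if num_subtasks ≥ 3 then subtasks ++ ["Perform the calculation for: " ++ task_description] else subtasks
        if num_subtasks ≥ 4 then subtasks ++ ["Verify the calculation approach for: " ++ task_description] else subtasks
      else subtasks
    PySem.List.slice subtasks none (some num_subtasks)
  else
    PySem.List.slice
      ((PySem.List.pyRange 0 (min num_subtasks 3) 1).map
        (fun _ => "Solve part of this problem: " ++ task_description))
      none (some num_subtasks)

-- ===== PORT B =====
def decompose_task_for_star_py_alt (task_description : String) (num_subtasks : Int) : List String :=
  let low := PySem.Str.lower task_description
  let rows : List (Int × String) :=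
    if PySem.Str.isIn "calculate" low || PySem.Str.isIn "compute" low then
      [(2, "Extract the numbers and key information from: "),
       (2, "Determine the mathematical operations needed for: "),
       (3, "Perform the calculation for: "),
       (4, "Verify the calculation approach for: ")]
    else
      [(1 : Int), 2, 3].map (fun need => (need, "Solve part of this problem: "))
  (rows.filter (fun r => num_subtasks ≥ r.1)).map (fun r => r.2 ++ task_description)

-- ===== PRECONDITION & SPEC =====
def Spec_decompose_task_for_star_py (task_description : String) (num_subtasks : Int) (out : List String) : Prop := out = decompose_task_for_star_py_alt task_description num_subtasks
instance (task_description : String) (num_subtasks : Int) (out : List String) : Decidable (Spec_decompose_task_for_star_py task_description num_subtasks out) := by unfold Spec_decompose_task_for_star_py; infer_instance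

-- ===== CLAIM (what is proved, stated in full; the proofs are below) =====
def Claim_equal_decompose_task_for_star_py : Prop := ∀ (task_description : String) (num_subtasks : Int), Dom_decompose_task_for_star_py task_description num_subtasks → Spec_decompose_task_for_star_py task_description num_subtasks (decompose_task_for_star_py task_description num_subtasks)

-- ===== LEMMAS AND PROOFS =====

-- ===== VERDICT (by name: the statement is the Claim_ definition above) =====
theorem decompose_task_for_star_py_spec : Claim_equal_decompose_task_for_star_py := by
  intro td n _
  unfold Spec_decompose_task_for_star_py decompose_task_for_star_py decompose_task_for_star_py_alt
  by_cases hc : (PySem.Str.isIn "calculate" (PySem.Str.lower td) ||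
     PySem.Str.isIn "compute" (PySem.Str.lower td)) = true
  · simp only [hc, if_true]
    by_cases h2 : n ≥ 2
    · by_cases h4 : n ≥ 4
      · have h3 : n ≥ 3 := by omega
        simp only [h2, h4, h3, if_true]
        rw [PySem.List.slice_to _ (by omega : (0:Int) ≤ n)]
        rw [List.take_of_length_le (by simp; omega)]
        simp [List.filter, h2, h3, h4]
      · by_cases h3 : n ≥ 3
        · have hn : n = 3 := by omega
          subst hn
          simp only [if_true, if_neg h4, h2, h3]
          rw [PySem.List.slice_to _ (by norm_num : (0:Int) ≤ 3)]
          rfl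
        · have hn : n = 2 := by omega
          subst hn
          simp only [if_neg h3, if_neg h4, if_pos h2]
          rw [PySem.List.slice_to _ (by norm_num : (0:Int) ≤ 2)]
          rfl
    · simp only [if_neg h2]
      simp [PySem.List.slice, List.filter, show ¬ n ≥ 2 from h2, show ¬ n ≥ 3 by omega, show ¬ n ≥ 4 by omega]
  · simp only [if_neg hc]
    by_cases h3 : n ≥ 3
    · have hmin : min n 3 = 3 := by omega
      rw [hmin]
      rw [PySem.List.slice_to _ (by omega : (0:Int) ≤ n)]
      rw [List.take_of_length_le (by simp [PySem.List.pyRange]; omega)]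
      simp [PySem.List.pyRange, List.filter, show n ≥ 1 by omega, show n ≥ 2 by omega, h3]
      rfl
    · by_cases h2 : n ≥ 2
      · have hn : n = 2 := by omega
        subst hn
        norm_num
        rfl
      · by_cases h1 : n ≥ 1
        · have hn : n = 1 := by omega
          subst hn
          norm_num
          rfl
        · have hmin : min n 3 = n := by omega
          rw [hmin]
          have : PySem.List.pyRange 0 n 1 = [] := by simp [PySem.List.pyRange]; omega
          rw [this]
          simp [PySem.List.slice, List.filter, show ¬ n ≥ 1 from h1, show ¬ n ≥ 2 by omega, show ¬ n ≥ 3 by omega]
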